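-- pv_equiv track=rewrite | github.com/atulmishra84/CTComlySphere | integrations/kubernetes_integration.py | _is_ai_workload
-- ===== SOURCE A (Python) =====
-- from typing import Dict, List, Optional, Any
--
-- def _is_ai_workload(labels: Dict[str, str], annotations: Dict[str, str]) -> bool:
--     """Determine if a workload is AI-related"""
--     if not labels and not annotations:
--         return False
--
--     ai_indicators = [
--         'ai', 'ml', 'model', 'tensorflow', 'pytorch', 'sklearn', 'huggingface',
--         'inference', 'training', 'serving', 'mlflow', 'kubeflow', 'seldon',
--         'kfserving', 'torchserve', 'triton', 'onnx', 'opencv', 'transformers'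
--     ]
--
--     # Check labels
--     if labels:
--         for key, value in labels.items():
--             for indicator in ai_indicators:
--                 if indicator in key.lower() or indicator in str(value).lower():
--                     return True
--
--     # Check annotations
--     if annotations:
--         for key, value in annotations.items():
--             for indicator in ai_indicators:
--                 if indicator in key.lower() or indicator in str(value).lower():
--                     return True
--
--     return False
-- ===== SOURCE B (Python) =====
-- _AI_INDICATORS = (
--     'ai', 'ml', 'model', 'tensorflow', 'pytorch', 'sklearn', 'huggingface',
--     'inference', 'training', 'serving', 'mlflow', 'kubeflow', 'seldon',
--     'kfserving', 'torchserve', 'triton', 'onnx', 'opencv', 'transformers'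
-- )
--
-- # the indicators indexed by their first letter: at a given position only the
-- # indicators whose first letter matches need to be tried
-- _BY_FIRST = {
--     'a': ('ai',),
--     'm': ('ml', 'model', 'mlflow'),
--     't': ('tensorflow', 'training', 'torchserve', 'triton', 'transformers'),
--     'p': ('pytorch',),
--     's': ('sklearn', 'serving', 'seldon'),
--     'h': ('huggingface',),
--     'i': ('inference',),
--     'k': ('kubeflow', 'kfserving'),
--     'o': ('onnx', 'opencv'),
-- }
--
--
-- def _hit(text):
--     # lowercase once, then one left-to-right pass: at each position try only
--     # the indicators that can start with the character found there
--     t = text.lower()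
--     get = _BY_FIRST.get
--     for i, c in enumerate(t):
--         for p in get(c, ()):
--             if t.startswith(p, i):
--                 return True
--     return False
--
--
-- def _is_ai_workload(labels, annotations):
--     return any(_hit(key) or _hit(str(value))
--                for d in (labels, annotations)
--                for key, value in d.items())
-- ===== Notes on version B (the rewrite author's own statement) =====
-- stated objective: alternative
-- what changed: B transposes the search: instead of A's guard/two dict loops/inner 19-indicator loop with one substring scan per indicator, B lowercases each text once, indexes the indicators by first letter, and makes a single left-to-right pass testing only the indicators filed under the character at each position as prefixes there; one any() over both dicts replaces the early-return control flow.
import Mathlib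
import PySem

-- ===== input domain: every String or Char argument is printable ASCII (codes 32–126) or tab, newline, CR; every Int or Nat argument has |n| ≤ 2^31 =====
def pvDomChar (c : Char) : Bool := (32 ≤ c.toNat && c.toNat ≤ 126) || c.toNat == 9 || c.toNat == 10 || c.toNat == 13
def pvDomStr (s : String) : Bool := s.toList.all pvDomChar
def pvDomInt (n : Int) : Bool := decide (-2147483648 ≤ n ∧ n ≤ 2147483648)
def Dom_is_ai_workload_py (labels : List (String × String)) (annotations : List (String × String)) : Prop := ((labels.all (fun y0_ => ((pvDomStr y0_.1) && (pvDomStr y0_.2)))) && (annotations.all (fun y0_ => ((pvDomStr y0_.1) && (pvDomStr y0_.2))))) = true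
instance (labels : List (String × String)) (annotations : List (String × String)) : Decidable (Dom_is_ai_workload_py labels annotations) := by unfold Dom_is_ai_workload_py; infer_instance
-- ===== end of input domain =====

-- B replaces A's per-indicator substring scans by one lowercase + one positional pass per text,
-- trying only the indicators indexed under each position's first letter (alternative decomposition).

-- ===== PORT A =====
def pvIndicators : List String :=
  ["ai", "ml", "model", "tensorflow", "pytorch", "sklearn", "huggingface",
   "inference", "training", "serving", "mlflow", "kubeflow", "seldon",
   "kfserving", "torchserve", "triton", "onnx", "opencv", "transformers"]

-- 'for key, value in d.items(): for indicator in ...: if ... : return True' over one dict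
def pvCheckDictA (d : List (String × String)) : Bool :=
  d.any (fun kv => pvIndicators.any (fun ind =>
    PySem.Str.isIn ind (PySem.Str.lower kv.1) || PySem.Str.isIn ind (PySem.Str.lower kv.2)))

def is_ai_workload_py (labels : List (String × String)) (annotations : List (String × String)) : Bool :=
  if labels.isEmpty && annotations.isEmpty then false
  else if (if !labels.isEmpty then pvCheckDictA labels else false) then true
  else if (if !annotations.isEmpty then pvCheckDictA annotations else false) then true
  else false

-- ===== PORT B =====
-- _BY_FIRST: the indicators indexed by their first letter
def pvByFirst : PySem.Dict Char (List String) := PySem.Dict.ofList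
  [('a', ["ai"]),
   ('m', ["ml", "model", "mlflow"]),
   ('t', ["tensorflow", "training", "torchserve", "triton", "transformers"]),
   ('p', ["pytorch"]),
   ('s', ["sklearn", "serving", "seldon"]),
   ('h', ["huggingface"]),
   ('i', ["inference"]),
   ('k', ["kubeflow", "kfserving"]),
   ('o', ["onnx", "opencv"])]

-- _hit: one pass over enumerate(t); at position i with character c, try only
-- the indicators filed under c ('t.startswith(p, i)' = prefix of the drop at i)
def pvHit (s : String) : Bool :=
  let t := (PySem.Str.lower s).toList
  (PySem.List.enumerate t).any (fun ic =>
    (PySem.Dict.getD pvByFirst ic.2 []).any (fun p => p.toList.isPrefixOf (t.drop ic.1.toNat)))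

def is_ai_workload_py_alt (labels : List (String × String)) (annotations : List (String × String)) : Bool :=
  [labels, annotations].any (fun d => d.any (fun kv => pvHit kv.1 || pvHit kv.2))

-- ===== PRECONDITION & SPEC =====
def Spec_is_ai_workload_py (labels : List (String × String)) (annotations : List (String × String)) (out : Bool) : Prop := out = is_ai_workload_py_alt labels annotations
instance (labels : List (String × String)) (annotations : List (String × String)) (out : Bool) : Decidable (Spec_is_ai_workload_py labels annotations out) := by unfold Spec_is_ai_workload_py; infer_instance

-- ===== CLAIM (what is proved, stated in full; the proofs are below) =====
def Claim_equal_is_ai_workload_py : Prop := ∀ (labels : List (String × String)) (annotations : List (String × String)), Dom_is_ai_workload_py labels annotations → Spec_is_ai_workload_py labels annotations (is_ai_workload_py labels annotations)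

-- ===== LEMMAS AND PROOFS =====

lemma pvIndicators_ne_nil : ∀ p ∈ pvIndicators, p.toList ≠ [] := by decide

-- the literal contents of the first-letter index
lemma pvByFirst_items : pvByFirst.items =
    [('a', ["ai"]), ('m', ["ml", "model", "mlflow"]),
     ('t', ["tensorflow", "training", "torchserve", "triton", "transformers"]),
     ('p', ["pytorch"]), ('s', ["sklearn", "serving", "seldon"]),
     ('h', ["huggingface"]), ('i', ["inference"]), ('k', ["kubeflow", "kfserving"]),
     ('o', ["onnx", "opencv"])] := rfl

-- the first-letter index holds exactly the indicators whose first letter is c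
lemma pvByFirst_eq_filter (c : Char) :
    PySem.Dict.getD pvByFirst c [] = pvIndicators.filter (fun p => p.toList.head? == some c) := by
  rw [PySem.Dict.getD, PySem.Dict.get?, pvByFirst_items]
  rcases eq_or_ne c 'a' with rfl | n1
  · simp [List.find?, pvIndicators]
  rcases eq_or_ne c 'm' with rfl | n2
  · simp [List.find?, pvIndicators]
  rcases eq_or_ne c 't' with rfl | n3
  · simp [List.find?, pvIndicators]
  rcases eq_or_ne c 'p' with rfl | n4
  · simp [List.find?, pvIndicators]
  rcases eq_or_ne c 's' with rfl | n5
  · simp [List.find?, pvIndicators]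
  rcases eq_or_ne c 'h' with rfl | n6
  · simp [List.find?, pvIndicators]
  rcases eq_or_ne c 'i' with rfl | n7
  · simp [List.find?, pvIndicators]
  rcases eq_or_ne c 'k' with rfl | n8
  · simp [List.find?, pvIndicators]
  rcases eq_or_ne c 'o' with rfl | n9
  · simp [List.find?, pvIndicators]
  have hr : pvIndicators.filter (fun p => p.toList.head? == some c) = [] := by
    rw [List.filter_eq_nil_iff]
    intro p hp
    fin_cases hp <;>
      simp [Ne.symm n1, Ne.symm n2, Ne.symm n3, Ne.symm n4, Ne.symm n5,
        Ne.symm n6, Ne.symm n7, Ne.symm n8, Ne.symm n9]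
  have e1 : ('a' == c) = false := by simp [Ne.symm n1]
  have e2 : ('m' == c) = false := by simp [Ne.symm n2]
  have e3 : ('t' == c) = false := by simp [Ne.symm n3]
  have e4 : ('p' == c) = false := by simp [Ne.symm n4]
  have e5 : ('s' == c) = false := by simp [Ne.symm n5]
  have e6 : ('h' == c) = false := by simp [Ne.symm n6]
  have e7 : ('i' == c) = false := by simp [Ne.symm n7]
  have e8 : ('k' == c) = false := by simp [Ne.symm n8]
  have e9 : ('o' == c) = false := by simp [Ne.symm n9]
  rw [hr]
  simp [List.find?, e1, e2, e3, e4, e5, e6, e7, e8, e9]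

-- B's indexed positional scan finds an indicator iff A's substring test does
lemma pvHit_eq (s : String) :
    pvHit s = pvIndicators.any (fun ind => PySem.Str.isIn ind (PySem.Str.lower s)) := by
  unfold pvHit
  set t := (PySem.Str.lower s).toList with ht
  have hstr : (PySem.Str.lower s).toList = t := ht.symm
  apply Bool.eq_iff_iff.mpr
  simp only [List.any_eq_true, pvByFirst_eq_filter, List.mem_filter,
    List.isPrefixOf_iff_prefix, beq_iff_eq]
  constructor
  · rintro ⟨ic, hic, p, ⟨hp, _⟩, hpre⟩
    refine ⟨p, hp, ?_⟩
    rw [PySem.Str.isIn_iff_infix, hstr, ← PySem.Chars.isIn_iff_infix _ _]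
    exact (PySem.Chars.exists_prefix_drop_iff_isIn _ _).mp ⟨ic.1.toNat, hpre⟩
  · rintro ⟨p, hp, hin⟩
    rw [PySem.Str.isIn_iff_infix, hstr, ← PySem.Chars.isIn_iff_infix _ _] at hin
    obtain ⟨j, hpre⟩ := (PySem.Chars.exists_prefix_drop_iff_isIn _ _).mpr hin
    have hne : p.toList ≠ [] := pvIndicators_ne_nil p hp
    have hj : j < t.length := by
      by_contra hjge
      simp only [not_lt] at hjge
      rw [List.drop_eq_nil_of_le hjge] at hpre
      exact hne (List.prefix_nil.mp hpre)
    refine ⟨((j : Int), t[j]), ?_, p, ⟨hp, ?_⟩, ?_⟩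
    · exact (PySem.List.mem_enumerate_iff _ _ _).mpr ⟨j, hj, by simp⟩
    · -- the first letter of p is the character at position j
      have hhead : (t.drop j).head? = p.toList.head? := by
        obtain ⟨r, hr⟩ := hpre
        rw [← hr]
        cases hp' : p.toList with
        | nil => exact absurd hp' hne
        | cons a l => simp
      rw [← hhead, List.head?_drop]
      simp [hj]
    · simpa using hpre

-- Bool 'any' distributes over '||' (used to split A's inner test into B's two hits)
lemma pvAnyOr {α : Type} (l : List α) (p q : α → Bool) :
    l.any (fun x => p x || q x) = (l.any p || l.any q) := by
  apply Bool.eq_iff_iff.mpr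
  simp only [List.any_eq_true, Bool.or_eq_true]
  constructor
  · rintro ⟨x, hx, h | h⟩
    · exact Or.inl ⟨x, hx, h⟩
    · exact Or.inr ⟨x, hx, h⟩
  · rintro (⟨x, hx, h⟩ | ⟨x, hx, h⟩)
    · exact ⟨x, hx, Or.inl h⟩
    · exact ⟨x, hx, Or.inr h⟩

-- A's inner indicator loop over 'p ∨ q' splits into B's two per-string hits
lemma pvCheckDictA_eq (d : List (String × String)) :
    pvCheckDictA d = d.any (fun kv => pvHit kv.1 || pvHit kv.2) := by
  unfold pvCheckDictA
  simp only [pvHit_eq, ← pvAnyOr]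

lemma pvCheckDictA_nil : pvCheckDictA [] = false := rfl

-- A's 'if labels:' guard around the loop is redundant: the loop over [] finds nothing
lemma pvGuard_eq (l : List (String × String)) :
    (if !l.isEmpty then pvCheckDictA l else false) = pvCheckDictA l := by
  cases l <;> simp [pvCheckDictA_nil]

-- ===== VERDICT (by name: the statement is the Claim_ definition above) =====
theorem is_ai_workload_py_spec : Claim_equal_is_ai_workload_py := by
  intro labels annotations _
  unfold Spec_is_ai_workload_py is_ai_workload_py is_ai_workload_py_alt
  simp only [List.any_cons, List.any_nil, Bool.or_false, ← pvCheckDictA_eq,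
    pvGuard_eq]
  by_cases h : (labels.isEmpty && annotations.isEmpty) = true
  · obtain ⟨hL, hA⟩ := by simpa [List.isEmpty_iff] using h
    simp [hL, hA, pvCheckDictA_nil]
  · simp only [h]
    cases pvCheckDictA labels <;> cases pvCheckDictA annotations <;> simp
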